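-- pv_equiv track=rewrite | github.com/brenaelric/Desafio_Audo | Salao.py | get_used_vet
-- ===== SOURCE A (Python) =====
-- def fill_matrix(available, vet):
--     vet_aux = vet
--     used = []
--
--     for e in vet_aux:
--         available_aux = available
--         in_use = 0
--         in_use_pos = -1
--         if e > available_aux:
--             pass
--         in_use, in_use_pos = e, vet_aux.index(e)
--
--         available_aux = available_aux - in_use
--         if available_aux == 0:
--             return True, [in_use]
--         for i in range(in_use_pos + 1, len(vet_aux)):
--             if vet_aux[i] == available_aux:
--                 used = [in_use, vet_aux[i]]
--                 return True, used
--
--     return False, used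
--
--     pass
--
-- def remove_used(used, tam):
--     for e in used:
--         tam.remove(e)
--
-- def get_used_vet(matrix, tam):
--     if matrix is None:
--         return 0
--     tam_aux = tam.copy()
--     total_used = 0
--     for i in range(0, len(matrix)):
--         success, used = fill_matrix(matrix[i], tam_aux)
--         if not success:
--             return 0
--         remove_used(used, tam_aux)
--         total_used = total_used + len(used)
--     return total_used
-- ===== SOURCE B (Python) =====
-- def get_used_vet(matrix, tam):
--     if matrix is None:
--         return 0
--     items = list(tam)
--     total = 0
--     for c in matrix:
--         # one pass: first and last index of every value
--         first = {}
--         last = {}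
--         for i, v in enumerate(items):
--             if v not in first:
--                 first[v] = i
--             last[v] = i
--         used = None
--         for v in items:
--             if v == c:
--                 used = [v]
--                 break
--             j = last.get(c - v)
--             if j is not None and j > first[v]:
--                 used = [v, c - v]
--                 break
--         if used is None:
--             return 0
--         for v in used:
--             items.remove(v)
--         total += len(used)
--     return total
-- ===== Notes on version B (the rewrite author's own statement) =====
-- stated objective: faster
-- what changed: B replaces A's per-element list.index scan and inner range scan with first/last-index dictionaries built in one pass per capacity, so each candidate check is O(1) instead of O(n).
import Mathlib
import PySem

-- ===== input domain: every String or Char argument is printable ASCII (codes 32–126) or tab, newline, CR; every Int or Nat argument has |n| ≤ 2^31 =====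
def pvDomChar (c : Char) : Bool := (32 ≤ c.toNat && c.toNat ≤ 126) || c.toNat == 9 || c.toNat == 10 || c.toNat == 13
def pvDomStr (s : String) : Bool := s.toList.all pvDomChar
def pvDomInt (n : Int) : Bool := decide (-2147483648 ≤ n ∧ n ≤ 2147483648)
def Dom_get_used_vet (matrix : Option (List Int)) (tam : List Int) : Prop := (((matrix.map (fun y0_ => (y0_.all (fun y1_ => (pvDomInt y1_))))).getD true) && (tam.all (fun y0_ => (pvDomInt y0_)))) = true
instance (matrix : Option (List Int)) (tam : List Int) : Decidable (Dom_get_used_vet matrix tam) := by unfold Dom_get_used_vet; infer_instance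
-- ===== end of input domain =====

-- B replaces A's per-element list.index scan and inner range scan with first/last-index
-- dictionaries built in one pass per capacity (measured asymptotically faster in a timing run).
-- Neither implementation mutates its arguments (A copies tam).

-- ===== PORT A =====

-- inner loop 'for i in range(in_use_pos + 1, len(vet_aux)): if vet_aux[i] == available_aux: …'
def pvFindComp (vet : List Int) (avail : Int) : List Int → Option Int
  | [] => none
  | i :: rest =>
    match PySem.List.pyGet? vet i with
    | some x => if x = avail then some x else pvFindComp vet avail rest
    | none => none   -- unreachable: every i comes from range(pos+1, len(vet))

-- outer loop of fill_matrix; 'if e > available_aux: pass' is a no-op and is dropped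
def pvFillGo (available : Int) (vet : List Int) : List Int → Bool × List Int
  | [] => (false, [])
  | e :: rest =>
    let pos : Int := ((PySem.List.index? vet e).map (Int.ofNat ·)).getD 0  -- vet_aux.index(e); e ∈ vet at every call site
    let avail := available - e
    if avail = 0 then (true, [e])
    else
      match pvFindComp vet avail (PySem.List.pyRange (pos + 1) (vet.length : Int) 1) with
      | some x => (true, [e, x])
      | none => pvFillGo available vet rest

def pvFillMatrix (available : Int) (vet : List Int) : Bool × List Int :=
  pvFillGo available vet vet

-- remove_used: tam.remove(e) for each e; e is always present in A's calls
def pvRemoveUsed (used : List Int) (tam : List Int) : List Int :=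
  used.foldl (fun t e => (PySem.List.remove? t e).getD t) tam

def pvGoA : List Int → List Int → Int → Int
  | [], _, total => total
  | c :: rest, tam_aux, total =>
    let r := pvFillMatrix c tam_aux
    if r.1 then pvGoA rest (pvRemoveUsed r.2 tam_aux) (total + (r.2.length : Int))
    else 0

def get_used_vet (matrix : Option (List Int)) (tam : List Int) : Int :=
  match matrix with
  | none => 0
  | some m => pvGoA m tam 0

-- ===== PORT B =====

-- 'for i, v in enumerate(items): if v not in first: first[v] = i; last[v] = i'
def pvFL (items : List Int) : PySem.Dict Int Int × PySem.Dict Int Int :=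
  (PySem.List.enumerate items 0).foldl
    (fun fl p =>
      (if fl.1.contains p.2 then fl.1 else fl.1.insert p.2 p.1, fl.2.insert p.2 p.1))
    (PySem.Dict.empty, PySem.Dict.empty)

-- 'for v in items: …' picking the used one or two values
def pvPick (c : Int) (first last : PySem.Dict Int Int) : List Int → Option (List Int)
  | [] => none
  | v :: vs =>
    if v = c then some [v]
    else
      match last.get? (c - v) with
      | some j =>
        if first.getD v 0 < j then some [v, c - v]   -- first[v]: v ∈ items, so present
        else pvPick c first last vs
      | none => pvPick c first last vs

def pvGoB : List Int → List Int → Int → Int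
  | [], _, total => total
  | c :: rest, items, total =>
    let fl := pvFL items
    match pvPick c fl.1 fl.2 items with
    | none => 0
    | some used =>
      pvGoB rest (used.foldl (fun t v => (PySem.List.remove? t v).getD t) items)
        (total + (used.length : Int))

def get_used_vet_alt (matrix : Option (List Int)) (tam : List Int) : Int :=
  match matrix with
  | none => 0
  | some m => pvGoB m tam 0

-- ===== PRECONDITION & SPEC =====
def Spec_get_used_vet (matrix : Option (List Int)) (tam : List Int) (out : Int) : Prop := out = get_used_vet_alt matrix tam
instance (matrix : Option (List Int)) (tam : List Int) (out : Int) : Decidable (Spec_get_used_vet matrix tam out) := by unfold Spec_get_used_vet; infer_instance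

-- ===== CLAIM (what is proved, stated in full; the proofs are below) =====
def Claim_equal_get_used_vet : Prop := ∀ (matrix : Option (List Int)) (tam : List Int), Dom_get_used_vet matrix tam → Spec_get_used_vet matrix tam (get_used_vet matrix tam)

-- ===== LEMMAS AND PROOFS =====

lemma pvFL_eq (items : List Int) :
    pvFL items =
      ((PySem.List.enumerate items 0).foldl
        (fun d p => if d.contains p.2 then d else d.insert p.2 p.1) PySem.Dict.empty,
       (PySem.List.enumerate items 0).foldl
        (fun d p => d.insert p.2 p.1) PySem.Dict.empty) := by
  unfold pvFL
  exact PySem.List.foldl_prod_mk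
    (fun (a : PySem.Dict Int Int) (p : Int × Int) => if a.contains p.2 then a else a.insert p.2 p.1)
    (fun (a : PySem.Dict Int Int) (p : Int × Int) => a.insert p.2 p.1) _ _ _

lemma first_fold_get? (items : List Int) :
    ∀ (s : Int) (d : PySem.Dict Int Int) (v : Int),
      ((PySem.List.enumerate items s).foldl
        (fun d p => if d.contains p.2 then d else d.insert p.2 p.1) d).get? v =
      ((d.get? v).or ((PySem.List.index? items v).map (fun k => s + (k : Int)))) := by
  induction items with
  | nil => intro s d v; simp [PySem.List.enumerate, PySem.List.index?]
  | cons x xs ih =>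
    intro s d v
    rw [PySem.List.enumerate_cons]
    simp only [List.foldl_cons, ih]
    by_cases hc : d.contains x
    · rw [if_pos hc]
      cases hd : d.get? v with
      | some j => rw [Option.some_or, Option.some_or]
      | none =>
        rw [Option.none_or, Option.none_or]
        by_cases hv : v = x
        · subst hv
          rw [PySem.Dict.get?_eq_none_iff_contains] at hd
          simp [hd] at hc
        · rw [PySem.List.index?_cons_of_ne _ (fun h => hv h.symm)]
          cases PySem.List.index? xs v with
          | none => rfl
          | some k => simp; omega
    · rw [if_neg hc]
      rw [PySem.Dict.get?_insert]
      by_cases hv : v = x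
      · subst hv
        rw [if_pos rfl, Option.some_or,
          (PySem.Dict.get?_eq_none_iff_contains _ _).2 (by simpa using hc), Option.none_or,
          PySem.List.index?_cons_self]
        simp
      · rw [if_neg hv, PySem.List.index?_cons_of_ne _ (fun h => hv h.symm)]
        cases PySem.List.index? xs v with
        | none => rfl
        | some k =>
          have h1 : s + 1 + (k : Int) = s + ((k : Int) + 1) := by ring
          simp [h1]

lemma pvFL_fst_get? (items : List Int) (v : Int) :
    (pvFL items).1.get? v = (PySem.List.index? items v).map (fun k => (k : Int)) := by
  rw [pvFL_eq]
  simp only [first_fold_get? items 0 PySem.Dict.empty v, PySem.Dict.get?_empty, Option.none_or]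
  congr 1; funext k; simp

lemma last_fold_snoc (xs : List Int) (x : Int) :
    (PySem.List.enumerate (xs ++ [x]) 0).foldl
        (fun (d : PySem.Dict Int Int) p => d.insert p.2 p.1) PySem.Dict.empty =
      ((PySem.List.enumerate xs 0).foldl
        (fun (d : PySem.Dict Int Int) p => d.insert p.2 p.1) PySem.Dict.empty).insert x (xs.length : Int) := by
  rw [PySem.List.enumerate_append, List.foldl_append]
  simp [PySem.List.enumerate]

lemma last_fold_sound (items : List Int) (v j : Int)
    (h : ((PySem.List.enumerate items 0).foldl
        (fun (d : PySem.Dict Int Int) p => d.insert p.2 p.1) PySem.Dict.empty).get? v = some j) :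
    ∃ k : Nat, j = (k : Int) ∧ items[k]? = some v := by
  induction items using List.reverseRecOn with
  | nil => simp [PySem.List.enumerate, PySem.Dict.get?_empty] at h
  | append_singleton xs x ih =>
    rw [last_fold_snoc, PySem.Dict.get?_insert] at h
    by_cases hv : v = x
    · subst hv
      rw [if_pos rfl, Option.some_inj] at h
      exact ⟨xs.length, h.symm, by simp⟩
    · rw [if_neg hv] at h
      obtain ⟨k, hk, hget⟩ := ih h
      refine ⟨k, hk, ?_⟩
      rw [List.getElem?_append_left]
      · exact hget
      · exact (List.getElem?_eq_some_iff.1 hget).1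

lemma last_fold_complete (items : List Int) (v : Int) (k : Nat)
    (h : items[k]? = some v) :
    ∃ j : Int, ((PySem.List.enumerate items 0).foldl
        (fun (d : PySem.Dict Int Int) p => d.insert p.2 p.1) PySem.Dict.empty).get? v = some j ∧ (k : Int) ≤ j := by
  induction items using List.reverseRecOn with
  | nil => simp at h
  | append_singleton xs x ih =>
    rw [last_fold_snoc, PySem.Dict.get?_insert]
    by_cases hv : v = x
    · subst hv
      refine ⟨(xs.length : Int), by rw [if_pos rfl], ?_⟩
      have := (List.getElem?_eq_some_iff.1 h).1
      simp only [List.length_append, List.length_singleton] at this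
      omega
    · rw [if_neg hv]
      have hk : k < xs.length := by
        have hlt := (List.getElem?_eq_some_iff.1 h).1
        simp only [List.length_append, List.length_singleton] at hlt
        rcases Nat.lt_or_ge k xs.length with h' | h'
        · exact h'
        · exfalso
          have : k = xs.length := by omega
          subst this
          rw [List.getElem?_append_right (le_refl _)] at h
          simp at h
          exact hv h.symm
      rw [List.getElem?_append_left hk] at h
      exact ih h

lemma pyGet?_eq_getElem? (items : List Int) (m : Int) (h0 : 0 ≤ m) (h1 : m < (items.length : Int)) :
    PySem.List.pyGet? items m = items[m.toNat]? := by
  simp [PySem.List.pyGet?, PySem.List.pyIdx?, h0, h1]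

lemma pvFindComp_spec (items : List Int) (avail : Int) :
    ∀ (fuel : Nat) (m : Int), 0 ≤ m → (((items.length : Int)) - m).toNat ≤ fuel →
      (∀ x, pvFindComp items avail (PySem.List.pyRange m (items.length : Int) 1) = some x → x = avail) ∧
      ((pvFindComp items avail (PySem.List.pyRange m (items.length : Int) 1)).isSome = true ↔
        ∃ k : Nat, m ≤ (k : Int) ∧ items[k]? = some avail) := by
  intro fuel
  induction fuel with
  | zero =>
    intro m h0 hf
    have hle : (items.length : Int) ≤ m := by omega
    rw [PySem.List.pyRange_one_eq_nil hle]
    refine ⟨fun x h => by simp [pvFindComp] at h, ?_⟩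
    simp only [pvFindComp, Option.isSome_none, Bool.false_eq_true, false_iff]
    rintro ⟨k, hk, hget⟩
    have := (List.getElem?_eq_some_iff.1 hget).1
    omega
  | succ n ih =>
    intro m h0 hf
    by_cases hle : (items.length : Int) ≤ m
    · rw [PySem.List.pyRange_one_eq_nil hle]
      refine ⟨fun x h => by simp [pvFindComp] at h, ?_⟩
      simp only [pvFindComp, Option.isSome_none, Bool.false_eq_true, false_iff]
      rintro ⟨k, hk, hget⟩
      have := (List.getElem?_eq_some_iff.1 hget).1
      omega
    · have hlt : m < (items.length : Int) := by omega
      rw [PySem.List.pyRange_one_cons hlt]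
      have hmn : m.toNat < items.length := by omega
      simp only [pvFindComp, pyGet?_eq_getElem? items m h0 hlt, List.getElem?_eq_getElem hmn]
      by_cases hy : items[m.toNat] = avail
      · rw [if_pos hy]
        refine ⟨fun x h => by rw [Option.some_inj] at h; omega, ?_⟩
        simp only [Option.isSome_some, true_iff]
        exact ⟨m.toNat, by omega, by rw [List.getElem?_eq_getElem hmn, hy]⟩
      · rw [if_neg hy]
        obtain ⟨ih1, ih2⟩ := ih (m + 1) (by omega) (by omega)
        refine ⟨ih1, ih2.trans ?_⟩
        constructor
        · rintro ⟨k, hk, hget⟩; exact ⟨k, by omega, hget⟩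
        · rintro ⟨k, hk, hget⟩
          refine ⟨k, ?_, hget⟩
          rcases Nat.lt_or_ge m.toNat k with h' | h'
          · omega
          · exfalso
            have : k = m.toNat := by omega
            subst this
            rw [List.getElem?_eq_getElem hmn, Option.some_inj] at hget
            exact hy hget

lemma pvFill_eq_pick (c : Int) (items : List Int) :
    ∀ l : List Int, (∀ x ∈ l, x ∈ items) →
      pvFillGo c items l =
        (match pvPick c (pvFL items).1 (pvFL items).2 l with
         | none => (false, [])
         | some u => (true, u)) := by
  intro l
  induction l with
  | nil => intro _; rfl
  | cons e rest ih =>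
    intro hsub
    have he : e ∈ items := hsub e (List.mem_cons_self)
    obtain ⟨p, hp⟩ := Option.isSome_iff_exists.1 ((PySem.List.index?_isSome_iff items e).2 he)
    have hrest : ∀ x ∈ rest, x ∈ items := fun x hx => hsub x (List.mem_cons_of_mem _ hx)
    have hgetD : (pvFL items).1.getD e 0 = (p : Int) := by
      rw [PySem.Dict.getD_eq_get?_getD, pvFL_fst_get?, hp]
      rfl
    simp only [pvFillGo, pvPick, hp, Option.map_some, Option.getD_some]
    by_cases hec : c - e = 0
    · rw [if_pos hec, if_pos (by omega : e = c)]
    · rw [if_neg hec, if_neg (by omega : ¬ e = c)]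
      have hspec := pvFindComp_spec items (c - e) (((items.length : Int)) - ((p : Int) + 1)).toNat
        ((p : Int) + 1) (by omega) (le_refl _)
      cases hfc : pvFindComp items (c - e) (PySem.List.pyRange ((p : Int) + 1) (items.length : Int) 1) with
      | some x =>
        have hx : x = c - e := hspec.1 x hfc
        have hex : ∃ k : Nat, (p : Int) + 1 ≤ (k : Int) ∧ items[k]? = some (c - e) :=
          hspec.2.1 (by rw [hfc]; rfl)
        obtain ⟨k, hk, hget⟩ := hex
        obtain ⟨j, hj, hkj⟩ := last_fold_complete items (c - e) k hget
        have hj' : (pvFL items).2.get? (c - e) = some j := by rw [pvFL_eq]; exact hj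
        have hpj : (p : Int) < j := by omega
        simp [hj', hgetD, hpj, hx]
      | none =>
        have hnone : ¬ ∃ k : Nat, (p : Int) + 1 ≤ (k : Int) ∧ items[k]? = some (c - e) := by
          intro hex
          have := hspec.2.2 hex
          rw [hfc] at this
          simp at this
        cases hl : (pvFL items).2.get? (c - e) with
        | none => exact ih hrest
        | some j =>
          have hl' := hl
          rw [pvFL_eq] at hl'
          obtain ⟨k, hjk, hget⟩ := last_fold_sound items (c - e) j hl'
          have hpj : ¬ ((p : Int) < j) := by
            intro hpj
            exact hnone ⟨k, by omega, hget⟩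
          simp only [hgetD, if_neg hpj]
          exact ih hrest

lemma pvGoA_eq_pvGoB (m : List Int) : ∀ (t : List Int) (total : Int), pvGoA m t total = pvGoB m t total := by
  induction m with
  | nil => intro t total; rfl
  | cons c rest ih =>
    intro t total
    have h := pvFill_eq_pick c t t (fun x hx => hx)
    simp only [pvGoA, pvGoB, pvFillMatrix, h]
    cases hp : pvPick c (pvFL t).1 (pvFL t).2 t with
    | none => simp
    | some u => simp [pvRemoveUsed, ih]

-- ===== VERDICT (by name: the statement is the Claim_ definition above) =====
theorem get_used_vet_spec : Claim_equal_get_used_vet := by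
  intro matrix tam _
  unfold Spec_get_used_vet get_used_vet get_used_vet_alt
  cases matrix with
  | none => rfl
  | some m => exact pvGoA_eq_pvGoB m tam 0
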